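-- pv_equiv track=rewrite | github.com/presentchris/Algorithm | n보다 커질때까지.py | solution
-- ===== SOURCE A (Python) =====
-- def solution(numbers, n):
--     sum = 0
--     for elem in numbers:
--         if sum > n:
--             return sum
--         else:
--             sum += elem
--     return sum
-- ===== SOURCE B (Python) =====
-- def solution(numbers, n):
--     # Build the full prefix-sum table first, then scan it.
--     prefixes = [0]
--     for x in numbers:
--         prefixes.append(prefixes[-1] + x)
--     # A checks the running sum *before* adding each element, so only
--     # prefix sums of 0..len-1 elements are tested; the grand total is
--     # returned unchecked if no earlier prefix exceeds n.
--     for p in prefixes[:-1]: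
--         if p > n:
--             return p
--     return prefixes[-1]
-- ===== Notes on version B (the rewrite author's own statement) =====
-- stated objective: alternative
-- what changed: Replaces A's single interleaved accumulate-and-test loop with a two-pass table formulation: build the full prefix-sum table, then scan its first len entries for the first value > n, falling back to the grand total.
import Mathlib
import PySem

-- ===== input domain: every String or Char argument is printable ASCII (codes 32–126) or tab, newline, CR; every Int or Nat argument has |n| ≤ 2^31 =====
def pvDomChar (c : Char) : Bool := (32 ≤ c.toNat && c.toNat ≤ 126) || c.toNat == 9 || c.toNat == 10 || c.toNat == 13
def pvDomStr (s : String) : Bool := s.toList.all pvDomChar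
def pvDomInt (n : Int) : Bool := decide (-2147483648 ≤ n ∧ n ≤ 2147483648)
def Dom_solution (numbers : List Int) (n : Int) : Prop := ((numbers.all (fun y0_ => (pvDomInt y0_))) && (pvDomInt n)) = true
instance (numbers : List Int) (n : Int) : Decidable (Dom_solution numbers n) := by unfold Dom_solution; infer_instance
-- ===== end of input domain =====

-- B replaces A's interleaved accumulate-and-test loop with a two-pass table formulation (build the prefix-sum table, then scan it); objective: alternative, same cost.


-- ===== PORT A =====
def solutionGo (n : Int) (s : Int) : List Int → Int
  | [] => s
  | x :: xs => if s > n then s else solutionGo n (s + x) xs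

def solution (numbers : List Int) (n : Int) : Int :=
  solutionGo n 0 numbers

-- ===== PORT B =====
def solution_alt (numbers : List Int) (n : Int) : Int :=
  let prefixes := numbers.foldl (fun acc x => acc ++ [acc.getLastD 0 + x]) [0]
  match prefixes.dropLast.find? (fun p => p > n) with
  | some v => v
  | none => prefixes.getLastD 0

-- ===== PRECONDITION & SPEC =====
def Spec_solution (numbers : List Int) (n : Int) (out : Int) : Prop := out = solution_alt numbers n
instance (numbers : List Int) (n : Int) (out : Int) : Decidable (Spec_solution numbers n out) := by unfold Spec_solution; infer_instance

-- ===== CLAIM (what is proved, stated in full; the proofs are below) =====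
def Claim_equal_solution : Prop := ∀ (numbers : List Int) (n : Int), Dom_solution numbers n → Spec_solution numbers n (solution numbers n)

-- ===== LEMMAS AND PROOFS =====

-- ===== VERDICT (by name: the statement is the Claim_ definition above) =====
-- prefix table built by the foldl is List.scanl (·+·)
theorem prefixes_eq_scanl (xs : List Int) (l0 : List Int) (s : Int) :
    xs.foldl (fun acc x => acc ++ [acc.getLastD 0 + x]) (l0 ++ [s]) =
      l0 ++ List.scanl (· + ·) s xs := by
  induction xs generalizing l0 s with
  | nil => simp
  | cons x xs ih =>
    simp only [List.foldl_cons, List.scanl]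
    have h : (l0 ++ [s]).getLastD 0 = s := by simp
    rw [h, List.append_assoc]
    have := ih (l0 ++ [s]) (s + x)
    simpa using this

theorem go_eq_table (n : Int) (xs : List Int) (s : Int) :
    solutionGo n s xs =
      (match (List.scanl (· + ·) s xs).dropLast.find? (fun p => p > n) with
       | some v => v
       | none => (List.scanl (· + ·) s xs).getLastD 0) := by
  induction xs generalizing s with
  | nil => simp [solutionGo]
  | cons x xs ih =>
    rw [List.scanl_cons]
    rcases hl : (List.scanl (· + ·) (s + x) xs) with _ | ⟨a, t⟩
    · exact absurd hl (by simp)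
    · simp only [solutionGo, List.dropLast_cons₂, List.find?_cons]
      by_cases h : s > n
      · simp [h]
      · simp only [h, if_false, ih (s + x), hl]
        simp

theorem solution_spec : Claim_equal_solution := by
  intro numbers n _
  unfold Spec_solution solution solution_alt
  have hp := prefixes_eq_scanl numbers [] 0
  simp only [List.nil_append] at hp
  rw [hp, go_eq_table]
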